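-- pv_equiv track=rewrite | github.com/PaulosNed/A2SV | 2017-grid-game/2017-grid-game.py | gridGame
-- ===== SOURCE A (Python) =====
-- from typing import List
--
-- def gridGame(grid: List[List[int]]) -> int:
--     if len(grid[0]) == 1:
--         return 0
--     elif len(grid[0]) == 2:
--         return min(grid[0][1], grid[1][0])
--     gridPs = [ [0] * len(grid[0]) for _ in range(2)]
--     for r in range(2):
--         for c in range(len(grid[0])-1, -1, -1):
--             prev = 0 if c + 1 >= len(gridPs[0]) else gridPs[r][c+1]
--             gridPs[r][c] += grid[r][c] + prev
--     min_ = float("inf")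
--     r = 0
--     c = 1
--     while(c < len(gridPs[0]) and gridPs[0][c + 1] > gridPs[1][0] - gridPs[1][c]):
--         c += 1
--         if c + 1 == len(gridPs[0]):
--             return min(gridPs[0][-1], gridPs[1][0] - gridPs[1][-1])
--
--     return min(gridPs[0][c], gridPs[1][0] - gridPs[1][c])
-- ===== SOURCE B (Python) =====
-- from typing import List
--
-- def gridGame(grid: List[List[int]]) -> int:
--     n = len(grid[0])
--     if n == 1:
--         return 0
--     if n == 2:
--         return min(grid[0][1], grid[1][0])
--     top = sum(grid[0][1:])      # points left for the top robot if it turns at column c (c = 1 here)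
--     bottom = grid[1][0]         # points left for the bottom robot if the turn is at column c
--     c = 1
--     while c < n - 1 and top - grid[0][c] > bottom:
--         top -= grid[0][c]
--         bottom += grid[1][c]
--         c += 1
--     return min(top, bottom)
-- ===== Notes on version B (the rewrite author's own statement) =====
-- stated objective: simpler
-- what changed: Replaced the two suffix-sum arrays and the array-walking while-loop (with its internal early return) by a single forward scan that maintains just two running scalars (top remaining / bottom collected) and stops at the same crossover column.
import Mathlib
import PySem

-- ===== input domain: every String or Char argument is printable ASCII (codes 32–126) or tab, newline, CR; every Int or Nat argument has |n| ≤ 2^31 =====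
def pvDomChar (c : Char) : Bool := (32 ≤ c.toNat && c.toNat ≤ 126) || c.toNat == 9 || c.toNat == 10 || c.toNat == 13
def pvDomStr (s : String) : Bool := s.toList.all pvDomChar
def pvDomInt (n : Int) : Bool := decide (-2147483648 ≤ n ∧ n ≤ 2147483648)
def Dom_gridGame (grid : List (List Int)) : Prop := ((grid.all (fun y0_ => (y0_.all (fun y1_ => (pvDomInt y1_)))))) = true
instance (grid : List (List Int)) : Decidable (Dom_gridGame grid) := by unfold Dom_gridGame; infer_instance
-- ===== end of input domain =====

-- B replaces A's two suffix-sum arrays and array-walking loop by a single scan with two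
-- running scalar sums (objective: simpler, O(1) extra space; same crossover semantics).

-- ===== PORT A =====
-- the inner 'for c in range(n-1,-1,-1)' loop of A: gridPs[r][c] = grid[r][c] + (next entry or 0)
def suffixSums : List Int → List Int
  | [] => []
  | x :: xs =>
    let s := suffixSums xs
    (x + s.headD 0) :: s

-- A's while loop; state c, fuel bounds the iterations (n is always enough).
def loopA (ps0 ps1 : List Int) (n : Nat) : Nat → Nat → Int
  | 0, c => min (ps0.getD c 0) (ps1.getD 0 0 - ps1.getD c 0)
  | fuel + 1, c =>
    if c < n ∧ ps0.getD (c + 1) 0 > ps1.getD 0 0 - ps1.getD c 0 then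
      -- c += 1; if c + 1 == len: return min(gridPs[0][-1], gridPs[1][0] - gridPs[1][-1])
      if c + 2 = n then min (ps0.getD (n - 1) 0) (ps1.getD 0 0 - ps1.getD (n - 1) 0)
      else loopA ps0 ps1 n fuel (c + 1)
    else min (ps0.getD c 0) (ps1.getD 0 0 - ps1.getD c 0)

def gridGame (grid : List (List Int)) : Int :=
  let row0 := grid.getD 0 []
  let n := row0.length
  if n = 1 then 0
  else if n = 2 then min (row0.getD 1 0) ((grid.getD 1 []).getD 0 0)
  else
    let ps0 := suffixSums row0                       -- grid[0][c] for c < n is all of row0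
    let ps1 := suffixSums ((grid.getD 1 []).take n)  -- grid[1][c] read only for c < n
    loopA ps0 ps1 n n 1

-- ===== PORT B =====
-- B's while loop: two running scalars, c from 1 up to the crossover (fuel = n suffices).
def loopB (r0 r1 : List Int) (n : Nat) : Nat → Nat → Int → Int → Int
  | 0, _, top, bottom => min top bottom
  | fuel + 1, c, top, bottom =>
    if c < n - 1 ∧ top - r0.getD c 0 > bottom then
      loopB r0 r1 n fuel (c + 1) (top - r0.getD c 0) (bottom + r1.getD c 0)
    else min top bottom

def gridGame_alt (grid : List (List Int)) : Int :=
  let row0 := grid.getD 0 []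
  let row1 := grid.getD 1 []
  let n := row0.length
  if n = 1 then 0
  else if n = 2 then min (row0.getD 1 0) (row1.getD 0 0)
  else loopB row0 row1 n n 1 ((row0.drop 1).sum) (row1.getD 0 0)  -- sum(grid[0][1:]) = sum of row0 minus its head

-- ===== PRECONDITION & SPEC =====
-- Pre_ excludes exactly the inputs on which Python A raises IndexError: empty grid, empty
-- first row, a missing second row when it is needed (n ≥ 2), or a second row shorter than
-- the indices A reads (n when n ≥ 3, 1 when n = 2).
def Pre_gridGame (grid : List (List Int)) : Prop :=
  grid ≠ [] ∧ 1 ≤ (grid.getD 0 []).length ∧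
    ((grid.getD 0 []).length = 1 ∨
      (2 ≤ grid.length ∧
        (if (grid.getD 0 []).length = 2 then 1 ≤ (grid.getD 1 []).length
         else (grid.getD 0 []).length ≤ (grid.getD 1 []).length)))
instance (grid : List (List Int)) : Decidable (Pre_gridGame grid) := by
  unfold Pre_gridGame; infer_instance

def pvWitness_gridGame : List (List Int) := [[2, 5, 4], [1, 5, 1]]

def Spec_gridGame (grid : List (List Int)) (out : Int) : Prop := out = gridGame_alt grid
instance (grid : List (List Int)) (out : Int) : Decidable (Spec_gridGame grid out) := by
  unfold Spec_gridGame; infer_instance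

-- ===== CLAIM (what is proved, stated in full; the proofs are below) =====
def Claim_equal_gridGame : Prop :=
  ∀ (grid : List (List Int)), Dom_gridGame grid → Pre_gridGame grid →
    Spec_gridGame grid (gridGame grid)

-- ===== LEMMAS AND PROOFS =====

-- suffix-sum array entries are suffix sums (out-of-range getD 0 matches the empty suffix)
theorem suffixSums_getD (l : List Int) (c : Nat) :
    (suffixSums l).getD c 0 = (l.drop c).sum := by
  induction l generalizing c with
  | nil => simp [suffixSums]
  | cons x xs ih =>
    cases c with
    | zero =>
      have h := ih 0
      simp only [List.getD, List.drop_zero] at h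
      simp [suffixSums, List.head?_eq_getElem?, h]
    | succ c => simpa [suffixSums] using ih c

theorem drop_sum_succ (l : List Int) (c : Nat) (hc : c < l.length) :
    (l.drop c).sum = l.getD c 0 + (l.drop (c + 1)).sum := by
  induction l generalizing c with
  | nil => simp at hc
  | cons x xs ih =>
    cases c with
    | zero => simp
    | succ c => simpa using ih c (by simpa using hc)

-- one-step unfoldings of the two loops
theorem loopA_succ (ps0 ps1 : List Int) (n fuel c : Nat) :
    loopA ps0 ps1 n (fuel + 1) c =
      if c < n ∧ ps0.getD (c + 1) 0 > ps1.getD 0 0 - ps1.getD c 0 then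
        if c + 2 = n then min (ps0.getD (n - 1) 0) (ps1.getD 0 0 - ps1.getD (n - 1) 0)
        else loopA ps0 ps1 n fuel (c + 1)
      else min (ps0.getD c 0) (ps1.getD 0 0 - ps1.getD c 0) := rfl

theorem loopB_succ (r0 r1 : List Int) (n fuel c : Nat) (top bottom : Int) :
    loopB r0 r1 n (fuel + 1) c top bottom =
      if c < n - 1 ∧ top - r0.getD c 0 > bottom then
        loopB r0 r1 n fuel (c + 1) (top - r0.getD c 0) (bottom + r1.getD c 0)
      else min top bottom := rfl

-- loopB stops immediately once c = n - 1
theorem loopB_stop (r0 r1 : List Int) (n fuel : Nat) (t b : Int) :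
    loopB r0 r1 n fuel (n - 1) t b = min t b := by
  cases fuel with
  | zero => rfl
  | succ fuel => simp [loopB]

-- the core correspondence: A's array walk equals B's scalar walk
theorem loop_eq (r0 r1 : List Int) (n : Nat) (hn : 3 ≤ n)
    (h0 : r0.length = n) (h1 : n ≤ r1.length) :
    ∀ fuel c, 1 ≤ c → c + 2 ≤ n → n - 2 - c < fuel →
      loopA (suffixSums r0) (suffixSums (r1.take n)) n fuel c =
        loopB r0 r1 n fuel c ((r0.drop c).sum) ((r1.take c).sum) := by
  -- A's bottom expression at c: total of r1.take n minus its suffix from c = (r1.take c).sum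
  have hbot : ∀ c, c ≤ n →
      (suffixSums (r1.take n)).getD 0 0 - (suffixSums (r1.take n)).getD c 0
        = (r1.take c).sum := by
    intro c hc
    rw [suffixSums_getD, suffixSums_getD, List.drop_zero]
    have hkey : r1.take c ++ (r1.take n).drop c = r1.take n := by
      conv_lhs => rw [show r1.take c = (r1.take n).take c by
        rw [List.take_take, Nat.min_eq_left hc]]
      exact List.take_append_drop c (r1.take n)
    have hsum := congrArg List.sum hkey
    rw [List.sum_append] at hsum
    omega
  intro fuel
  induction fuel with
  | zero => intro c _ _ h; omega
  | succ fuel ih =>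
    intro c hc1 hc2 hfuel
    have hclt : c < n := by omega
    have hAcond : (suffixSums r0).getD (c + 1) 0 = (r0.drop c).sum - r0.getD c 0 := by
      rw [suffixSums_getD, drop_sum_succ r0 c (by omega)]; ring
    have hbotc : (suffixSums (r1.take n)).getD 0 0 - (suffixSums (r1.take n)).getD c 0
        = (r1.take c).sum := hbot c (by omega)
    have hstep0 : (r0.drop c).sum - r0.getD c 0 = (r0.drop (c + 1)).sum := by
      rw [drop_sum_succ r0 c (by omega)]; ring
    have hstep1 : (r1.take c).sum + r1.getD c 0 = (r1.take (c + 1)).sum := by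
      rw [List.sum_take_succ r1 c (by omega), List.getD_eq_getElem r1 0 (by omega)]
    rw [loopA_succ, loopB_succ]
    by_cases hcnd : (r0.drop c).sum - r0.getD c 0 > (r1.take c).sum
    · have hA : c < n ∧ (suffixSums r0).getD (c + 1) 0 >
          (suffixSums (r1.take n)).getD 0 0 - (suffixSums (r1.take n)).getD c 0 :=
        ⟨hclt, by rw [hAcond, hbotc]; exact hcnd⟩
      have hB : c < n - 1 ∧ (r0.drop c).sum - r0.getD c 0 > (r1.take c).sum :=
        ⟨by omega, hcnd⟩
      rw [if_pos hA, if_pos hB]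
      by_cases hend : c + 2 = n
      · rw [if_pos hend, hstep0, hstep1]
        have hc1n : c + 1 = n - 1 := by omega
        rw [hc1n, loopB_stop]
        rw [suffixSums_getD, hbot (n - 1) (by omega)]
      · rw [if_neg hend, hstep0, hstep1]
        exact ih (c + 1) (by omega) (by omega) (by omega)
    · have hA : ¬ (c < n ∧ (suffixSums r0).getD (c + 1) 0 >
          (suffixSums (r1.take n)).getD 0 0 - (suffixSums (r1.take n)).getD c 0) := by
        rintro ⟨-, h⟩; rw [hAcond, hbotc] at h; exact hcnd h
      have hB : ¬ (c < n - 1 ∧ (r0.drop c).sum - r0.getD c 0 > (r1.take c).sum) := by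
        rintro ⟨-, h⟩; exact hcnd h
      rw [if_neg hA, if_neg hB, suffixSums_getD, hbotc]

-- ===== VERDICT (by name: the statement is the Claim_ definition above) =====
theorem gridGame_spec : Claim_equal_gridGame := by
  intro grid _ hpre
  obtain ⟨hne, hlen, hcase⟩ := hpre
  unfold Spec_gridGame gridGame gridGame_alt
  by_cases h1 : (grid.getD 0 []).length = 1
  · rw [if_pos h1, if_pos h1]
  · by_cases h2 : (grid.getD 0 []).length = 2
    · rw [if_neg h1, if_neg h1, if_pos h2, if_pos h2]
    · rcases hcase with h | ⟨hg2, hif⟩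
      · exact absurd h h1
      · rw [if_neg h2] at hif
        have hn3 : 3 ≤ (grid.getD 0 []).length := by omega
        rw [if_neg h1, if_neg h2, if_neg h1, if_neg h2]
        have hr1len : 1 ≤ (grid.getD 1 []).length := by omega
        have hinit1 : ((grid.getD 1 []).take 1).sum = (grid.getD 1 []).getD 0 0 := by
          cases hh : grid.getD 1 [] with
          | nil => rw [hh] at hr1len; simp at hr1len
          | cons x xs => simp
        rw [← hinit1]
        exact loop_eq _ _ _ hn3 rfl hif _ 1 (by omega) (by omega) (by omega)
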